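-- pv_equiv track=rewrite | github.com/miloszchodan/Learning-Python | Projekty/Lab09/2021-IAD-09.py | szukaj_bezpiecznych_dan
-- ===== SOURCE A (Python) =====
-- def szukaj_bezpiecznych_dan(dane, lista):
--     licznik = 0
--     for i in range(len(dane)):
--         alergeny = 0
--         for j in range(len(lista)):
--             alergeny += dane[i][lista[j]]
--         if alergeny == 0:
--             licznik += 1
--         else:
--             continue
--     dania = [0] * licznik
--     nowy_licznik = 0
--     for i in range(len(dane)):
--         alergeny_1 = 0
--         for j in range(len(lista)):
--             alergeny_1 += dane[i][lista[j]]
--         if alergeny_1 == 0: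
--             dania[nowy_licznik] = i
--             nowy_licznik += 1
--         else:
--             continue
--     return dania
-- ===== SOURCE B (Python) =====
-- def szukaj_bezpiecznych_dan(dane, lista):
--     return [i for i, danie in enumerate(dane)
--             if sum(danie[skladnik] for skladnik in lista) == 0]
-- ===== Notes on version B (the rewrite author's own statement) =====
-- stated objective: simpler
-- what changed: Replaces A's two identical counting/filling passes (pre-sized list plus a write index) with a single enumerate-based list comprehension that appends each qualifying row index directly.
import Mathlib
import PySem

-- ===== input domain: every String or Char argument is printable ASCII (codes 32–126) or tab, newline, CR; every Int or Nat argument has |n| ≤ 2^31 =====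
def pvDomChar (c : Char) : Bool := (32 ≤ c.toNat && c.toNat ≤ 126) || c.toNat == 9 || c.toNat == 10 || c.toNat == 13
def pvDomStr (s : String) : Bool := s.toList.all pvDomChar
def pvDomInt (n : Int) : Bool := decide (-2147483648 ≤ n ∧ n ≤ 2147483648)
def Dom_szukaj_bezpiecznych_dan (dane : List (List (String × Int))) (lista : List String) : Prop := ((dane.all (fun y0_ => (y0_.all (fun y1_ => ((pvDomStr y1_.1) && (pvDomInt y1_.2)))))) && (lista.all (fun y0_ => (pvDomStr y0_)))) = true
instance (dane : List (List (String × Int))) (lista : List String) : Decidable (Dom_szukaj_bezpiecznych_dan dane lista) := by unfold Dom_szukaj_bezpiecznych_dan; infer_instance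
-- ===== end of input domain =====

-- B replaces A's two identical counting/filling passes over row indices with one
-- enumerate-based comprehension appending each safe row index directly (simpler; same cost).


-- ===== PORT A =====
-- inner loop 'for j in range(len(lista)): alergeny += dane[i][lista[j]]'; dict lookup
-- is exact under Pre_ (every key of lista present in the row — otherwise Python raises KeyError)
def pvRowSumA (row : List (String × Int)) (lista : List String) : Int :=
  (PySem.List.pyRange 0 (lista.length : Int) 1).foldl
    (fun acc j =>
      acc + ((PySem.Dict.mk row).get? (PySem.List.pyGetD lista j "")).getD 0) 0

def szukaj_bezpiecznych_dan (dane : List (List (String × Int))) (lista : List String) : List Int :=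
  -- first pass: count rows with zero allergens
  let licznik : Int :=
    (PySem.List.pyRange 0 (dane.length : Int) 1).foldl
      (fun c i => if pvRowSumA (PySem.List.pyGetD dane i []) lista = 0 then c + 1 else c) 0
  -- dania = [0] * licznik; second pass writes indices via nowy_licznik
  let s :=
    (PySem.List.pyRange 0 (dane.length : Int) 1).foldl
      (fun (s : List Int × Int) i =>
        if pvRowSumA (PySem.List.pyGetD dane i []) lista = 0 then
          (PySem.List.pySetD s.1 s.2 i, s.2 + 1)
        else s)
      (List.replicate licznik.toNat 0, 0)
  s.1

-- ===== PORT B =====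
-- 'sum(danie[skladnik] for skladnik in lista)'
def pvRowSumB (danie : List (String × Int)) (lista : List String) : Int :=
  lista.foldl (fun acc k => acc + ((PySem.Dict.mk danie).get? k).getD 0) 0

def szukaj_bezpiecznych_dan_alt (dane : List (List (String × Int))) (lista : List String) : List Int :=
  (PySem.List.enumerate dane 0).filterMap
    (fun p => if pvRowSumB p.2 lista = 0 then some p.1 else none)

-- ===== PRECONDITION & SPEC =====
-- Pre_ excludes exactly the inputs where Python A raises KeyError: some row lacks a key of lista.
def Pre_szukaj_bezpiecznych_dan (dane : List (List (String × Int))) (lista : List String) : Prop :=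
  ∀ row ∈ dane, ∀ k ∈ lista, k ∈ row.map Prod.fst
instance (dane : List (List (String × Int))) (lista : List String) : Decidable (Pre_szukaj_bezpiecznych_dan dane lista) := by unfold Pre_szukaj_bezpiecznych_dan; infer_instance

def pvWitness_szukaj_bezpiecznych_dan : (List (List (String × Int))) × List String :=
  ([[("a", 0), ("b", 1)], [("a", 1), ("b", 0)]], ["a"])

def Spec_szukaj_bezpiecznych_dan (dane : List (List (String × Int))) (lista : List String) (out : List Int) : Prop := out = szukaj_bezpiecznych_dan_alt dane lista
instance (dane : List (List (String × Int))) (lista : List String) (out : List Int) : Decidable (Spec_szukaj_bezpiecznych_dan dane lista out) := by unfold Spec_szukaj_bezpiecznych_dan; infer_instance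

-- ===== CLAIM (what is proved, stated in full; the proofs are below) =====
def Claim_equal_szukaj_bezpiecznych_dan : Prop := ∀ (dane : List (List (String × Int))) (lista : List String), Dom_szukaj_bezpiecznych_dan dane lista → Pre_szukaj_bezpiecznych_dan dane lista → Spec_szukaj_bezpiecznych_dan dane lista (szukaj_bezpiecznych_dan dane lista)

-- ===== LEMMAS AND PROOFS =====

-- the two row sums agree (index loop over lista vs direct iteration)
lemma pvRowSum_eq (row : List (String × Int)) (lista : List String) :
    pvRowSumA row lista = pvRowSumB row lista := by
  unfold pvRowSumA pvRowSumB
  exact PySem.List.foldl_pyRange_zero_pyGetD lista ""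
    (fun acc k => acc + ((PySem.Dict.mk row).get? k).getD 0) 0

-- A's first pass counts the filtered indices
lemma pvCount_eq (l : List Int) (q : Int → Prop) [DecidablePred q] (c : Int) :
    l.foldl (fun c i => if q i then c + 1 else c) c = c + ((l.filter (fun i => decide (q i))).length : Int) := by
  induction l generalizing c with
  | nil => simp
  | cons x t ih =>
      by_cases hx : q x
      · simp [hx, ih]; omega
      · simp [hx, ih]

-- A's second pass fills the preallocated list with the filtered indices, in order
lemma pvFill_eq (q : Int → Prop) [DecidablePred q] (l t : List Int)
    (k : Nat) (hk : k = (l.filter (fun i => decide (q i))).length) :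
    l.foldl (fun (s : List Int × Int) i => if q i then (PySem.List.pySetD s.1 s.2 i, s.2 + 1) else s)
      (t ++ List.replicate k 0, (t.length : Int))
    = (t ++ l.filter (fun i => decide (q i)), ((t.length + k : Nat) : Int)) := by
  induction l generalizing t k with
  | nil => simp_all
  | cons x rest ih =>
      by_cases hx : q x
      · simp only [List.foldl_cons, if_pos hx]
        have hk' : k = (rest.filter (fun i => decide (q i))).length + 1 := by
          simpa [hx] using hk
        subst hk'
        have hset : PySem.List.pySetD (t ++ List.replicate ((rest.filter (fun i => decide (q i))).length + 1) 0) (t.length : Int) x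
            = (t ++ [x]) ++ List.replicate (rest.filter (fun i => decide (q i))).length 0 := by
          rw [PySem.List.pySetD_natCast]
          rw [List.set_append_right _ _ (Nat.le_refl _)]
          simp [List.replicate_succ]
        rw [hset]
        have := ih (t ++ [x]) ((rest.filter (fun i => decide (q i))).length) rfl
        simp only [List.length_append, List.length_cons, List.length_nil] at this ⊢
        have hcast : ((t.length : Int) + 1) = (((t.length + 1) : Nat) : Int) := by push_cast; ring
        rw [hcast, this]
        simp [hx]
        omega
      · simp only [List.foldl_cons, if_neg hx]
        have hk' : k = (rest.filter (fun i => decide (q i))).length := by simpa [hx] using hk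
        rw [ih t k (by simpa [hx] using hk)]
        simp [hx]

-- filter with a decidable test is the filterMap of its guard
lemma pvFilter_eq_filterMap (q : Int → Prop) [DecidablePred q] (l : List Int) :
    l.filter (fun i => decide (q i)) = l.filterMap (fun i => if q i then some i else none) := by
  induction l with
  | nil => rfl
  | cons x t ih => by_cases hx : q x <;> simp [hx, ih]

-- ===== VERDICT (by name: the statement is the Claim_ definition above) =====
theorem szukaj_bezpiecznych_dan_spec : Claim_equal_szukaj_bezpiecznych_dan := by
  intro dane lista _ _
  unfold Spec_szukaj_bezpiecznych_dan szukaj_bezpiecznych_dan szukaj_bezpiecznych_dan_alt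
  rw [PySem.List.enumerate_eq_map_pyRange (d := []), List.filterMap_map]
  set q : Int → Prop := fun i => pvRowSumB (PySem.List.pyGetD dane i []) lista = 0 with hq
  have hrow : ∀ (i : Int), pvRowSumA (PySem.List.pyGetD dane i []) lista
      = pvRowSumB (PySem.List.pyGetD dane i []) lista := fun i => pvRowSum_eq _ _
  simp only [hrow]
  have hcount := pvCount_eq (PySem.List.pyRange 0 (dane.length : Int) 1) q 0
  rw [hcount]
  have hfill := pvFill_eq q (PySem.List.pyRange 0 (dane.length : Int) 1) [] _ rfl
  simp only [List.nil_append, List.length_nil, Nat.cast_zero] at hfill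
  have htoNat : ((0 : Int) + (((PySem.List.pyRange 0 (dane.length : Int) 1).filter (fun i => decide (q i))).length : Int)).toNat
      = ((PySem.List.pyRange 0 (dane.length : Int) 1).filter (fun i => decide (q i))).length := by
    omega
  rw [htoNat, hfill]
  rw [pvFilter_eq_filterMap q]
  simp [Function.comp, hq]
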